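-- pv_equiv track=rewrite | github.com/rg98/aoc2023 | 3-1.py | next_num
-- ===== SOURCE A (Python) =====
-- schema = []
--
-- def next_num(schema: [str], x: int, y: int) -> (str, int, int):
--     i = y
--     j = x
--     for row in schema[y:]:
--         for c in row[j:]:
--             if c in '0123456789':
--                 n = c
--                 k =  j + 1
--                 while k < len(row) and row[k] in '0123456789':
--                     n += row[k]
--                     k +=  1
--                 return n, j, i
--             else:
--                 j += 1
--         j = 0
--         i += 1
--     return None, -1, -1
--
-- x = 0
--
-- y = 0
--
-- n = ''
-- ===== SOURCE B (Python) =====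
-- import re
--
-- def next_num(schema, x, y):
--     for i, row in enumerate(schema[y:], y):
--         start = x if i == y else 0
--         m = re.search(r'[0-9]+', row[start:])
--         if m is not None:
--             return m.group(), m.start() + start, i
--     return None, -1, -1
-- ===== Notes on version B (the rewrite author's own statement) =====
-- stated objective: idiomatic
-- what changed: B replaces A's character-by-character counter walk (nested for over the row suffix plus a separate while-loop extending the number via direct row[k] indexing) by one regex search per row: enumerate(schema[y:], y) and re.search('[0-9]+', row[start:]) yield the match text and absolute column directly.
-- intended difference: For start positions x in [-len(row),0) on the first scanned row where the first digit run of row[x:] reaches the row end and row[0] is itself a digit, A's while-loop index wraps past the row end to the row start and returns a garbled, duplicated number string (e.g. (['22'],-1,0) -> ('222',-1,0)); B returns the actual digit run ('2'), which is the intended match. — e.g. on next_num(["22"], -1, 0): A returns (some "222", -1, 0), B returns (some "2", -1, 0)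
-- outside the precondition, e.g. on next_num(['a1'], -3, 0): A returns ('11', -2, 0), B returns ('1', -2, 0)
import Mathlib
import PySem

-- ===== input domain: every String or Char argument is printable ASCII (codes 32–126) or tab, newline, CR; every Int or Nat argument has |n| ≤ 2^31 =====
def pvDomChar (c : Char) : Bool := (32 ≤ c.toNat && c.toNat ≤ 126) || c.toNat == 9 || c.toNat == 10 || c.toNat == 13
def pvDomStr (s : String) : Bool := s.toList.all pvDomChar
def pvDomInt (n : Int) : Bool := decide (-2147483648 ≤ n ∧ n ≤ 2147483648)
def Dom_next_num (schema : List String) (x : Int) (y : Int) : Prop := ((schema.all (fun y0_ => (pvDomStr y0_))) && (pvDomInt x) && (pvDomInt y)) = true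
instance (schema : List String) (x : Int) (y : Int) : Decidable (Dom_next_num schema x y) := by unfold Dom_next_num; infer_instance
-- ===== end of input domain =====

-- B replaces A's per-character counter walk by one first-digit-run search per row (idiomatic); ports and
-- the equivalence claim (A = B outside D_next_num, on Pre_next_num) are below.

-- ===== PORT A =====
-- 'while k < len(row) and row[k] in "0123456789": n += row[k]; k += 1'
-- row[k] is Python indexing (negative k wraps): PySem.List.pyGet?; 'none' = IndexError (A raises; outside Pre_).
-- Fuel = number of remaining k-steps ((len - k).toNat at the call site); 'c in "0123456789"' is Char.isDigit (exact).
def nnWhile (row : List Char) (k : Int) (n : List Char) (fuel : Nat) : List Char :=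
  match fuel with
  | 0 => n
  | f + 1 =>
    if k < (row.length : Int) then
      match PySem.List.pyGet? row k with
      | some c => if c.isDigit then nnWhile row (k + 1) (n ++ [c]) f else n
      | none => n    -- Python raises IndexError here (outside Pre_)
    else n

-- 'for c in row[j:]: if c in "0123456789": … return n, j, i  else: j += 1'
def nnInner (row : List Char) : List Char → Int → Option (List Char × Int)
  | [], _ => none
  | c :: rest, j =>
    if c.isDigit then
      some (nnWhile row (j + 1) [c] (((row.length : Int) - (j + 1)).toNat), j)
    else nnInner row rest (j + 1)

-- 'for row in schema[y:]: …  j = 0; i += 1'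
def nnOuter : List String → Int → Int → Option String × Int × Int
  | [], _, _ => (none, -1, -1)
  | row :: rows, j, i =>
    match nnInner row.toList (PySem.List.slice row.toList (some j) none) j with
    | some (n, jj) => (some (String.ofList n), jj, i)
    | none => nnOuter rows 0 (i + 1)

def next_num (schema : List String) (x : Int) (y : Int) : Option String × Int × Int :=
  nnOuter (PySem.List.slice schema (some y) none) x y

-- ===== PORT B =====
-- re.search(r'[0-9]+', s): offset of the first digit, then the maximal digit run there.
def nbSearch (cs : List Char) : Option (Nat × List Char) :=
  match cs.findIdx? Char.isDigit with
  | none => none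
  | some p => some (p, ((cs.drop p).takeWhile Char.isDigit))

-- 'for i, row in enumerate(schema[y:], y): start = x if i == y else 0; m = re.search(...); …'
def nbLoop (x y : Int) : List String → Int → Option String × Int × Int
  | [], _ => (none, -1, -1)
  | row :: rows, i =>
    let start := if i = y then x else 0
    match nbSearch (PySem.List.slice row.toList (some start) none) with
    | some (p, g) => (some (String.ofList g), (p : Int) + start, i)
    | none => nbLoop x y rows (i + 1)

def next_num_alt (schema : List String) (x : Int) (y : Int) : Option String × Int × Int :=
  nbLoop x y (PySem.List.slice schema (some y) none) y

-- ===== PRECONDITION & SPEC =====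
-- Pre_ excludes x < -len(first scanned row) when that row contains a digit: there A's counter-based
-- negative indexing is out of range — it raises IndexError or returns a number read from wrapped positions.
def Pre_next_num (schema : List String) (x : Int) (y : Int) : Prop :=
  let r := (((PySem.List.slice schema (some y) none).headD "").toList);
  -(r.length : Int) ≤ x ∨ r.all (fun c => !c.isDigit) = true
instance (schema : List String) (x : Int) (y : Int) : Decidable (Pre_next_num schema x y) := by
  unfold Pre_next_num; infer_instance

def pvWitness_next_num : List String × Int × Int := (["ab", "c12d"], 0, 0)

-- For start positions x in [-len(row),0) on the first scanned row where the first digit run of row[x:]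
-- reaches the row end and row[0] is itself a digit, A's while-loop index wraps past the row end to the
-- row start and returns a garbled, duplicated number string; B returns the actual digit run, the intended match.
def D_next_num (schema : List String) (x : Int) (y : Int) : Prop :=
  let r := ((PySem.List.slice schema (some y) none).headD "").toList;
  let u := (r.drop (r.length + x).toNat).dropWhile (fun c => !c.isDigit);
  x < 0 ∧ -(r.length:Int) ≤ x ∧ u ≠ [] ∧ u.all Char.isDigit ∧ (r.headD ' ').isDigit
instance (schema : List String) (x : Int) (y : Int) : Decidable (D_next_num schema x y) := by
  unfold D_next_num; infer_instance

def Spec_next_num (schema : List String) (x : Int) (y : Int) (out : Option String × Int × Int) : Prop :=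
  ¬ D_next_num schema x y → out = next_num_alt schema x y
instance (schema : List String) (x : Int) (y : Int) (out : Option String × Int × Int) : Decidable (Spec_next_num schema x y out) := by
  unfold Spec_next_num; infer_instance

def pvDiffWitness_next_num : List String × Int × Int := (["22"], -1, 0)
def pvDiffWitnessOut_next_num : (Option String × Int × Int) × (Option String × Int × Int) :=
  ((some "222", -1, 0), (some "2", -1, 0))

-- ===== CLAIM (what is proved, stated in full; the proofs are below) =====
def Claim_unchanged_next_num : Prop := ∀ (schema : List String) (x : Int) (y : Int), Dom_next_num schema x y → Pre_next_num schema x y → Spec_next_num schema x y (next_num schema x y)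
def Claim_changed_next_num : Prop := Dom_next_num (pvDiffWitness_next_num.1) (pvDiffWitness_next_num.2.1) (pvDiffWitness_next_num.2.2) ∧ Pre_next_num (pvDiffWitness_next_num.1) (pvDiffWitness_next_num.2.1) (pvDiffWitness_next_num.2.2) ∧ D_next_num (pvDiffWitness_next_num.1) (pvDiffWitness_next_num.2.1) (pvDiffWitness_next_num.2.2) ∧ next_num (pvDiffWitness_next_num.1) (pvDiffWitness_next_num.2.1) (pvDiffWitness_next_num.2.2) = pvDiffWitnessOut_next_num.1 ∧ next_num_alt (pvDiffWitness_next_num.1) (pvDiffWitness_next_num.2.1) (pvDiffWitness_next_num.2.2) = pvDiffWitnessOut_next_num.2 ∧ pvDiffWitnessOut_next_num.1 ≠ pvDiffWitnessOut_next_num.2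
def Claim_exact_next_num : Prop := ∀ (schema : List String) (x : Int) (y : Int), Dom_next_num schema x y → Pre_next_num schema x y → D_next_num schema x y → next_num schema x y ≠ next_num_alt schema x y

-- ===== LEMMAS AND PROOFS =====

-- A's while-loop from a nonnegative index k appends the digit run of row starting at k.
lemma pv_wpos : ∀ (fuel : Nat) (row : List Char) (k : Nat) (acc : List Char),
    row.length - k ≤ fuel →
    nnWhile row (k : Int) acc fuel = acc ++ (row.drop k).takeWhile Char.isDigit
  | 0, row, k, acc, h => by
      have hk : row.length ≤ k := by omega
      simp [nnWhile, List.drop_eq_nil_of_le hk]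
  | (f+1), row, k, acc, h => by
      rw [nnWhile]
      by_cases hk : k < row.length
      · rw [if_pos (by exact_mod_cast hk)]
        rw [PySem.List.pyGet?_natCast, List.getElem?_eq_getElem hk]
        by_cases hd : row[k].isDigit
        · simp only [hd, if_true]
          have hc : (k : Int) + 1 = ((k+1 : Nat) : Int) := by push_cast; ring
          rw [hc, pv_wpos f row (k+1) (acc ++ [row[k]]) (by omega)]
          conv_rhs => rw [List.drop_eq_getElem_cons hk, List.takeWhile_cons]
          simp [hd]
        · simp only [hd, if_false]
          conv_rhs => rw [List.drop_eq_getElem_cons hk, List.takeWhile_cons]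
          simp [hd]
      · rw [if_neg (by exact_mod_cast hk)]
        rw [List.drop_eq_nil_of_le (by omega)]
        simp

-- A's while-loop from index 0 (the moment a wrapped scan crosses the row start).
lemma pv_wneg_end (row : List Char) (acc : List Char) (fuel : Nat) (hf : row.length ≤ fuel) :
    nnWhile row 0 acc fuel =
      if (row.headD ' ').isDigit then acc ++ row.takeWhile Char.isDigit else acc := by
  rw [show (0:Int) = ((0:Nat):Int) from rfl, pv_wpos fuel row 0 acc (by omega)]
  rw [List.drop_zero]
  by_cases hh : (row.headD ' ').isDigit
  · rw [if_pos hh]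
  · rw [if_neg hh]
    have ht : row.takeWhile Char.isDigit = [] := by
      cases row with
      | nil => rfl
      | cons a l =>
        have ha : ¬ a.isDigit := by simpa using hh
        simp [List.takeWhile_cons, ha]
    rw [ht, List.append_nil]

-- A's while-loop from the NEGATIVE index t - len(row) (Python wraps): it reads row[t..] via
-- negative indices and, if that run reaches the row end, continues from row[0].
lemma pv_wneg (d : Nat) : ∀ (row : List Char) (t : Nat) (acc : List Char) (fuel : Nat),
    row.length - t ≤ d → t ≤ row.length → 2*row.length - t ≤ fuel →
    nnWhile row ((t : Int) - row.length) acc fuel =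
      if (row.drop t).all Char.isDigit then
        (if (row.headD ' ').isDigit then acc ++ row.drop t ++ row.takeWhile Char.isDigit
         else acc ++ row.drop t)
      else acc ++ (row.drop t).takeWhile Char.isDigit := by
  induction d with
  | zero =>
    intro row t acc fuel h1 h2 h3
    have ht : t = row.length := by omega
    subst ht
    rw [show ((row.length:Nat):Int) - (row.length:Int) = (0:Int) by ring]
    rw [pv_wneg_end row acc fuel (by omega)]
    rw [List.drop_eq_nil_of_le (le_refl _)]
    split_ifs <;> simp_all
  | succ d ih =>
    intro row t acc fuel h1 h2 h3
    by_cases hteq : row.length ≤ t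
    · have ht : t = row.length := by omega
      subst ht
      rw [show ((row.length:Nat):Int) - (row.length:Int) = (0:Int) by ring]
      rw [pv_wneg_end row acc fuel (by omega)]
      rw [List.drop_eq_nil_of_le (le_refl _)]
      split_ifs <;> simp_all
    · have htl : t < row.length := by omega
      cases fuel with
      | zero => omega
      | succ f =>
        rw [nnWhile]
        rw [if_pos (by push_cast; omega)]
        rw [show (t:Int) - row.length = -(((row.length - t : Nat)):Int) by push_cast; omega]
        rw [PySem.List.pyGet?_neg_natCast row (row.length - t) (by omega) (by omega)]
        rw [show row.length - (row.length - t) = t by omega]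
        rw [List.getElem?_eq_getElem htl]
        by_cases hdg : row[t].isDigit
        · simp only [hdg, if_true]
          rw [show -(((row.length - t : Nat)):Int) + 1 = ((t+1 : Nat):Int) - row.length by push_cast; omega]
          rw [ih row (t+1) (acc ++ [row[t]]) f (by omega) (by omega) (by omega)]
          rw [List.drop_eq_getElem_cons htl]
          simp only [List.all_cons, hdg, Bool.true_and, List.takeWhile_cons, if_true]
          split_ifs <;> simp
        · simp only [hdg]
          have hmem : row[t] ∈ List.drop t row := by
            rw [List.drop_eq_getElem_cons htl]
            exact List.mem_cons_self ..
          have hallf : ¬ ((List.drop t row).all Char.isDigit = true) := by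
            rw [List.all_eq_true]
            intro hco
            exact hdg (hco _ hmem)
          rw [if_neg hallf, List.drop_eq_getElem_cons htl, List.takeWhile_cons, if_neg hdg,
            List.append_nil]
          simp

-- A's inner for-loop with a nonnegative counter equals B's first-digit-run search (offset by s).
lemma pv_inner_pos : ∀ (cs row : List Char) (s : Nat), cs = row.drop s →
    nnInner row cs (s : Int) = (nbSearch cs).map (fun pg => (pg.2, (s : Int) + pg.1))
  | [], row, s, h => by simp [nnInner, nbSearch]
  | (c :: rest), row, s, h => by
      have hlen : s < row.length := by
        by_contra hh
        rw [List.drop_eq_nil_of_le (Nat.le_of_not_lt hh)] at h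
        exact absurd h (by simp)
      rw [List.drop_eq_getElem_cons hlen] at h
      obtain ⟨hc, hrest⟩ := List.cons_eq_cons.mp h
      rw [nnInner]
      by_cases hd : c.isDigit
      · rw [if_pos hd]
        rw [show (s:Int) + 1 = ((s+1 : Nat) : Int) by push_cast; ring]
        rw [pv_wpos _ row (s+1) [c] (by omega)]
        rw [← hrest]
        simp [nbSearch, List.findIdx?_cons, hd, List.takeWhile_cons]
      · rw [if_neg hd]
        rw [show (s:Int) + 1 = ((s+1 : Nat) : Int) by push_cast; ring]
        rw [pv_inner_pos rest row (s+1) hrest]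
        simp only [nbSearch, List.findIdx?_cons, hd, if_false]
        cases hfi : rest.findIdx? Char.isDigit with
        | none => simp [hfi]
        | some p =>
          simp [hfi, List.drop_succ_cons, Prod.ext_iff]
          all_goals omega

-- A's inner for-loop with the negative counter s - len(row) on the first row, outside the
-- wrap-around region D: same result as B's search, with columns offset by s - len(row).
lemma pv_inner_neg : ∀ (cs row : List Char) (s : Nat), cs = row.drop s →
    ¬((cs.dropWhile (fun c => !c.isDigit)) ≠ [] ∧
      (cs.dropWhile (fun c => !c.isDigit)).all Char.isDigit = true ∧
      (row.headD ' ').isDigit = true) →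
    nnInner row cs ((s : Int) - row.length) =
      (nbSearch cs).map (fun pg => (pg.2, (s : Int) - row.length + pg.1))
  | [], row, s, h, hnd => by simp [nnInner, nbSearch]
  | (c :: rest), row, s, h, hnd => by
      have hlen : s < row.length := by
        by_contra hh
        rw [List.drop_eq_nil_of_le (Nat.le_of_not_lt hh)] at h
        exact absurd h (by simp)
      rw [List.drop_eq_getElem_cons hlen] at h
      obtain ⟨hc, hrest⟩ := List.cons_eq_cons.mp h
      rw [nnInner]
      by_cases hd : c.isDigit
      · rw [if_pos hd]
        rw [show (s:Int) - row.length + 1 = ((s+1 : Nat) : Int) - row.length by push_cast; ring]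
        rw [pv_wneg (row.length - (s+1)) row (s+1) [c] _ (le_refl _) (by omega) (by omega)]
        have hdw : (c :: rest).dropWhile (fun c => !c.isDigit) = c :: rest := by
          simp [List.dropWhile_cons, hd]
        rw [hdw] at hnd
        by_cases hall : (row.drop (s+1)).all Char.isDigit
        · have hhd : ¬ (row.headD ' ').isDigit = true := by
            intro hhh
            exact hnd ⟨by simp, by rw [← hrest] at hall; simp [List.all_cons, hd, hall], hhh⟩
          rw [if_pos hall, if_neg hhd]
          have htw : (row.drop (s+1)).takeWhile Char.isDigit = row.drop (s+1) :=
            List.takeWhile_eq_self_iff.mpr (by simpa [List.all_eq_true] using hall)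
          rw [← hrest] at htw ⊢
          simp [nbSearch, List.findIdx?_cons, hd, List.takeWhile_cons, htw]
        · rw [if_neg hall]
          rw [← hrest]
          simp [nbSearch, List.findIdx?_cons, hd, List.takeWhile_cons]
      · rw [if_neg hd]
        have hdw : (c :: rest).dropWhile (fun c => !c.isDigit) = rest.dropWhile (fun c => !c.isDigit) := by
          simp [List.dropWhile_cons, hd]
        rw [hdw] at hnd
        rw [show (s:Int) - row.length + 1 = ((s+1 : Nat) : Int) - row.length by push_cast; ring]
        rw [pv_inner_neg rest row (s+1) hrest hnd]
        simp only [nbSearch, List.findIdx?_cons, hd, if_false]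
        cases hfi : rest.findIdx? Char.isDigit with
        | none => simp [hfi]
        | some p =>
          simp [hfi, List.drop_succ_cons, Prod.ext_iff]
          all_goals omega

-- With no digit in the scanned slice, A's inner loop finds nothing (any counter j).
lemma pv_inner_nod : ∀ (cs : List Char) (row : List Char) (j : Int),
    cs.all (fun c => !c.isDigit) = true → nnInner row cs j = none
  | [], _, _, _ => rfl
  | (c :: rest), row, j, h => by
      rw [nnInner]
      have h1 : (!c.isDigit) = true := by simpa [List.all_cons] using And.left (by simpa [List.all_cons] using h : (!c.isDigit) = true ∧ rest.all (fun c => !c.isDigit) = true)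
      have h2 : rest.all (fun c => !c.isDigit) = true := And.right (by simpa [List.all_cons] using h : (!c.isDigit) = true ∧ rest.all (fun c => !c.isDigit) = true)
      rw [if_neg (by simpa using h1)]
      exact pv_inner_nod rest row (j+1) h2

-- … and so does B's search.
lemma pv_nb_nod (cs : List Char) (h : cs.all (fun c => !c.isDigit) = true) : nbSearch cs = none := by
  unfold nbSearch
  have hfi : cs.findIdx? Char.isDigit = none := by
    rw [List.findIdx?_eq_none_iff]
    intro x hx
    have := List.all_eq_true.mp h x hx
    simpa using this
  rw [hfi]

-- After the first row both programs scan each row from column 0: they agree row by row.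
lemma pv_outer : ∀ (rows : List String) (x y i : Int), y < i →
    nnOuter rows 0 i = nbLoop x y rows i
  | [], _, _, _, _ => rfl
  | (row :: rows), x, y, i, h => by
      rw [nnOuter, nbLoop]
      have hne : ¬ (i = y) := by omega
      simp only [hne, if_false]
      rw [PySem.List.slice_from row.toList (le_refl (0:Int))]
      rw [show ((0:Int).toNat) = 0 from rfl, List.drop_zero]
      rw [show (0:Int) = ((0:Nat):Int) from rfl]
      rw [pv_inner_pos row.toList row.toList 0 (by rw [List.drop_zero])]
      cases hsr : nbSearch row.toList with
      | none => exact pv_outer rows x y (i+1) (by omega)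
      | some pg => simp [Prod.ext_iff] <;> omega

-- The equivalence outside D_ (on Pre_), assembled from the row lemmas.
lemma pv_main : ∀ (schema : List String) (x y : Int), Pre_next_num schema x y →
    ¬ D_next_num schema x y → next_num schema x y = next_num_alt schema x y := by
  intro schema x y hpre hnD
  unfold next_num next_num_alt
  cases hrows : PySem.List.slice schema (some y) none with
  | nil => rfl
  | cons r rest =>
    unfold Pre_next_num at hpre
    unfold D_next_num at hnD
    rw [hrows] at hpre hnD
    simp only [List.headD_cons] at hpre hnD
    rw [nnOuter, nbLoop]
    have hif : (if (y:Int) = y then x else (0:Int)) = x := if_pos rfl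
    rw [hif]
    rcases lt_or_ge x 0 with hx | hx
    · rcases le_or_gt (-(r.toList.length : Int)) x with hxin | hxout
      · -- -len ≤ x < 0 : wrapped scan, but outside D_ it still finds the plain digit run
        rw [show x = -(((-x).toNat : Nat) : Int) by omega] at hnD ⊢
        rw [PySem.List.slice_some_none]
        rw [PySem.List.clampIdx_neg_natCast _ _ (by omega)]
        rw [show -((((-x).toNat : Nat)) : Int) = ((r.toList.length - (-x).toNat : Nat) : Int) - r.toList.length by push_cast; omega]
        rw [pv_inner_neg (r.toList.drop (r.toList.length - (-x).toNat)) r.toList (r.toList.length - (-x).toNat) rfl ?hnd]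
        case hnd =>
          rw [show ((r.toList.length : Int) + -(((-x).toNat : Nat) : Int)).toNat = r.toList.length - (-x).toNat by omega] at hnD
          intro hcon
          exact hnD ⟨by push_cast; omega, by push_cast; omega, hcon⟩
        cases hsr : nbSearch (r.toList.drop (r.toList.length - (-x).toNat)) with
        | none => exact pv_outer rest _ y (y+1) (by omega)
        | some pg => simp [Prod.ext_iff] <;> omega
      · -- x < -len : by Pre_ the row has no digit; both skip it
        have hall : r.toList.all (fun c => !c.isDigit) = true := by
          rcases hpre with hp | hp
          · omega
          · exact hp
        rw [PySem.List.slice_some_none]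
        have hcl : PySem.List.clampIdx r.toList.length x = 0 := by
          rw [show x = -(((-x).toNat : Nat) : Int) by omega]
          rw [PySem.List.clampIdx_neg_natCast _ _ (by omega)]
          omega
        rw [hcl, List.drop_zero]
        rw [pv_inner_nod r.toList r.toList x hall, pv_nb_nod r.toList hall]
        exact pv_outer rest _ y (y+1) (by omega)
    · -- 0 ≤ x
      rw [show x = ((x.toNat : Nat) : Int) by omega]
      rw [PySem.List.slice_from r.toList (by omega)]
      rw [Int.toNat_natCast]
      rw [pv_inner_pos (r.toList.drop x.toNat) r.toList x.toNat rfl]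
      cases hsr : nbSearch (r.toList.drop x.toNat) with
      | none => exact pv_outer rest _ y (y+1) (by omega)
      | some pg => simp [Prod.ext_iff] <;> omega

-- B's search when the digit run of cs runs to its end: it returns exactly that run.
lemma pv_nb_cons_nd (c : Char) (rest : List Char) (hd : ¬ c.isDigit = true) :
    nbSearch (c :: rest) = (nbSearch rest).map (fun pg => (pg.1 + 1, pg.2)) := by
  simp only [nbSearch, List.findIdx?_cons, hd, if_false]
  cases hfi : rest.findIdx? Char.isDigit with
  | none => simp
  | some p => simp [List.drop_succ_cons]

lemma pv_nb_D : ∀ (cs : List Char),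
    (cs.dropWhile (fun c => !c.isDigit)) ≠ [] →
    (cs.dropWhile (fun c => !c.isDigit)).all Char.isDigit = true →
    ∃ p, nbSearch cs = some (p, cs.dropWhile (fun c => !c.isDigit))
  | [], hne, _ => absurd rfl hne
  | (c :: rest), hne, hall => by
      by_cases hd : c.isDigit
      · refine ⟨0, ?_⟩
        have hdw : (c :: rest).dropWhile (fun c => !c.isDigit) = c :: rest := by
          simp [List.dropWhile_cons, hd]
        rw [hdw] at hall ⊢
        have htw : (c :: rest).takeWhile Char.isDigit = c :: rest :=
          List.takeWhile_eq_self_iff.mpr (by simpa [List.all_eq_true] using hall)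
        simp [nbSearch, List.findIdx?_cons, hd, htw]
      · have hdw : (c :: rest).dropWhile (fun c => !c.isDigit) = rest.dropWhile (fun c => !c.isDigit) := by
          simp [List.dropWhile_cons, hd]
        rw [hdw] at hne hall ⊢
        obtain ⟨p, hp⟩ := pv_nb_D rest hne hall
        refine ⟨p + 1, ?_⟩
        rw [pv_nb_cons_nd c rest hd, hp]
        rfl

-- A's inner loop inside the wrap-around region D: the digit run PLUS the wrapped-in prefix run.
lemma pv_inner_D : ∀ (cs row : List Char) (s : Nat), cs = row.drop s →
    (cs.dropWhile (fun c => !c.isDigit)) ≠ [] →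
    (cs.dropWhile (fun c => !c.isDigit)).all Char.isDigit = true →
    (row.headD ' ').isDigit = true →
    ∃ j, nnInner row cs ((s : Int) - row.length) =
      some ((cs.dropWhile (fun c => !c.isDigit)) ++ row.takeWhile Char.isDigit, j)
  | [], row, s, h, hne, _, _ => absurd rfl hne
  | (c :: rest), row, s, h, hne, hall, hhd => by
      have hlen : s < row.length := by
        by_contra hh
        rw [List.drop_eq_nil_of_le (Nat.le_of_not_lt hh)] at h
        exact absurd h (by simp)
      rw [List.drop_eq_getElem_cons hlen] at h
      obtain ⟨hc, hrest⟩ := List.cons_eq_cons.mp h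
      rw [nnInner]
      by_cases hd : c.isDigit
      · rw [if_pos hd]
        refine ⟨(s:Int) - row.length, ?_⟩
        rw [show (s:Int) - row.length + 1 = ((s+1 : Nat) : Int) - row.length by push_cast; ring]
        rw [pv_wneg (row.length - (s+1)) row (s+1) [c] _ (le_refl _) (by omega) (by omega)]
        have hdw : (c :: rest).dropWhile (fun c => !c.isDigit) = c :: rest := by
          simp [List.dropWhile_cons, hd]
        rw [hdw] at hall ⊢
        have hallr : (row.drop (s+1)).all Char.isDigit := by
          rw [← hrest]
          simpa [List.all_cons, hd] using hall
        rw [if_pos hallr, if_pos hhd]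
        rw [← hrest]
        simp
      · rw [if_neg hd]
        have hdw : (c :: rest).dropWhile (fun c => !c.isDigit) = rest.dropWhile (fun c => !c.isDigit) := by
          simp [List.dropWhile_cons, hd]
        rw [hdw] at hne hall ⊢
        rw [show (s:Int) - row.length + 1 = ((s+1 : Nat) : Int) - row.length by push_cast; ring]
        exact pv_inner_D rest row (s+1) hrest hne hall hhd

-- Inside D_ the two ports genuinely differ: A's number string is strictly longer than B's.
lemma pv_tight : ∀ (schema : List String) (x y : Int), D_next_num schema x y →
    next_num schema x y ≠ next_num_alt schema x y := by
  intro schema x y hD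
  unfold D_next_num at hD
  unfold next_num next_num_alt
  cases hrows : PySem.List.slice schema (some y) none with
  | nil =>
    rw [hrows] at hD
    simp only [List.headD_nil] at hD
    exact absurd hD.2.2.1 (by simp)
  | cons r rest =>
    rw [hrows] at hD
    simp only [List.headD_cons] at hD
    obtain ⟨hx0, hxin, hu, hua, hhd⟩ := hD
    rw [nnOuter, nbLoop]
    have hif : (if (y:Int) = y then x else (0:Int)) = x := if_pos rfl
    rw [hif]
    set s := ((r.toList.length : Int) + x).toNat with hs
    rw [PySem.List.slice_some_none]
    have hclx : PySem.List.clampIdx r.toList.length x = s := by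
      rw [show x = -(((-x).toNat : Nat) : Int) by omega, PySem.List.clampIdx_neg_natCast _ _ (by omega)]
      omega
    rw [hclx]
    rw [show x = ((s:Nat):Int) - (r.toList.length:Int) by omega]
    obtain ⟨j1, hA⟩ := pv_inner_D (r.toList.drop s) r.toList s rfl hu hua hhd
    rw [hA]
    obtain ⟨p, hB⟩ := pv_nb_D (r.toList.drop s) hu hua
    rw [hB]
    intro hcon
    have h1 : String.ofList ((r.toList.drop s).dropWhile (fun c => !c.isDigit) ++ r.toList.takeWhile Char.isDigit)
        = String.ofList ((r.toList.drop s).dropWhile (fun c => !c.isDigit)) := by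
      have := congrArg Prod.fst hcon
      simpa using this
    have h2 := congrArg String.toList h1
    simp only [String.toList_ofList] at h2
    have h3 := congrArg List.length h2
    rw [List.length_append] at h3
    have h4 : (r.toList.takeWhile Char.isDigit).length = 0 := by omega
    have hrne : r.toList ≠ [] := by
      intro hni
      apply hu
      rw [hni]
      simp
    obtain ⟨a, l, hal⟩ := List.exists_cons_of_ne_nil hrne
    rw [hal] at hhd h4
    have had : a.isDigit = true := by simpa using hhd
    rw [List.takeWhile_cons, if_pos had] at h4
    simp at h4

-- ===== VERDICT (by name: the statement is the Claim_ definition above) =====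
theorem next_num_spec : Claim_unchanged_next_num := by
  intro schema x y _ hpre
  unfold Spec_next_num
  intro hnD
  exact pv_main schema x y hpre hnD
theorem next_num_changed : Claim_changed_next_num := by unfold Claim_changed_next_num; decide
theorem next_num_tight : Claim_exact_next_num := by
  intro schema x y _ _ hD
  exact pv_tight schema x y hD
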